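-- pv_equiv track=rewrite | github.com/Erickrus/leetcode | enigma.py | nonAlphaSplit
-- ===== SOURCE A (Python) =====
-- def nonAlphaSplit(text):
--     res = []
--     text = "#"+text
--     for i in range(len(text)):
--         ch = text[i]
--         if ch.isalpha():
--             prevCh = text[i-1]
--             if prevCh.isalpha():
--                 res[-1] += ch
--             else:
--                 res.append(ch)
--     return res
-- ===== SOURCE B (Python) =====
-- def nonAlphaSplit(text):
--     return ''.join(c if c.isalpha() else ' ' for c in text).split()
-- ===== Notes on version B (the rewrite author's own statement) =====
-- stated objective: idiomatic
-- what changed: Replaces A's index loop with prevCh run-builder (prepending '#' and growing res[-1] by string concatenation) by a two-phase pipeline: map non-alphabetic characters to spaces, then str.split() yields the maximal alphabetic runs.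
import Mathlib
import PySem

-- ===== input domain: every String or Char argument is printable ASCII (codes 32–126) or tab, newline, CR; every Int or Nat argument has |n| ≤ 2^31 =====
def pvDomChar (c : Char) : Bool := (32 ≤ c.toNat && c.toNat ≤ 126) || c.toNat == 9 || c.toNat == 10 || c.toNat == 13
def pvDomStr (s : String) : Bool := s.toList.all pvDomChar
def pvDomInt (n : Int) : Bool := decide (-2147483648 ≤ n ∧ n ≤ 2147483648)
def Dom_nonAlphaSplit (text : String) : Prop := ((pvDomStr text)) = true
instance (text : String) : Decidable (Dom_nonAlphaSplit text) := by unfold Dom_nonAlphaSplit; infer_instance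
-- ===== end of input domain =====

-- B replaces A's stateful prevCh run-builder by a transform-then-split pipeline (non-alpha → space, then split()); objective: idiomatic.

-- ===== PORT A =====
-- the body of A's loop: ch alpha → extend res[-1] if prevCh alpha, else start a new run
def pvStepA (prev ch : Char) (res : List (List Char)) : List (List Char) :=
  if PySem.Chars.isalpha ch then
    if PySem.Chars.isalpha prev then res.dropLast ++ [(res.getLast?.getD []) ++ [ch]]
    else res ++ [[ch]]
  else res

def nonAlphaSplit (text : String) : List String :=
  -- text = "#" + text; runs kept as List Char (PySem string ops are List Char); res[-1] += ch = rewrite the last run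
  let t : List Char := '#' :: text.toList
  ((PySem.List.pyRange 0 (t.length : Int) 1).foldl
    (fun res i => pvStepA (PySem.List.pyGetD t (i - 1) ' ') (PySem.List.pyGetD t i ' ') res)
    []).map String.ofList

-- ===== PORT B =====
def nonAlphaSplit_alt (text : String) : List String :=
  PySem.Str.split₀ (String.ofList (text.toList.map (fun c => if PySem.Chars.isalpha c then c else ' ')))

-- ===== PRECONDITION & SPEC =====
def Spec_nonAlphaSplit (text : String) (out : List String) : Prop := out = nonAlphaSplit_alt text
instance (text : String) (out : List String) : Decidable (Spec_nonAlphaSplit text out) := by unfold Spec_nonAlphaSplit; infer_instance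

-- ===== CLAIM (what is proved, stated in full; the proofs are below) =====
def Claim_equal_nonAlphaSplit : Prop := ∀ (text : String), Dom_nonAlphaSplit text → Spec_nonAlphaSplit text (nonAlphaSplit text)

-- ===== LEMMAS AND PROOFS =====

-- maximal p-runs of a character list (the common reference both ports are reduced to)
def pvRuns (p : Char → Bool) : List Char → List (List Char)
  | [] => []
  | c :: cs =>
    if p c then (c :: cs.takeWhile p) :: pvRuns p (cs.dropWhile p) else pvRuns p cs
termination_by l => l.length
decreasing_by
  · have := List.length_dropWhile_le p cs; simp; omega
  · simp

-- A's loop, re-stated as structural recursion over the character list with the previous char carried along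
def pvAloop (prev : Char) (cs : List Char) (res : List (List Char)) : List (List Char) :=
  match cs with
  | [] => res
  | c :: rest => pvAloop c rest (pvStepA prev c res)

lemma pvAlpha_not_space (c : Char) (h : PySem.Chars.isalpha c = true) :
    PySem.Chars.isspace c = false := by
  simp only [PySem.Chars.isalpha, PySem.Chars.isupper, PySem.Chars.islower, Bool.or_eq_true,
    Bool.and_eq_true, decide_eq_true_eq, Char.le_def, UInt32.le_iff_toNat_le,
    show ('A').val.toNat = 65 from rfl, show ('Z').val.toNat = 90 from rfl,
    show ('a').val.toNat = 97 from rfl, show ('z').val.toNat = 122 from rfl] at h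
  simp only [PySem.Chars.isspace, Char.toNat, Bool.or_eq_false_iff, Bool.and_eq_false_iff,
    decide_eq_false_iff_not]
  omega

-- split₀.go characterised by pvRuns (p = not-space)
lemma pvGo_runs (s : List Char) : ∀ (cur : List Char) (acc : List (List Char)),
    PySem.Chars.split₀.go s cur acc =
      acc.reverse ++
        (if cur.isEmpty then pvRuns (fun c => ! PySem.Chars.isspace c) s
         else (cur.reverse ++ s.takeWhile (fun c => ! PySem.Chars.isspace c)) ::
              pvRuns (fun c => ! PySem.Chars.isspace c) (s.dropWhile (fun c => ! PySem.Chars.isspace c))) := by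
  induction s with
  | nil =>
    intro cur acc
    by_cases h : cur.isEmpty <;> simp [PySem.Chars.split₀.go, h, pvRuns]
  | cons c rest ih =>
    intro cur acc
    by_cases hc : PySem.Chars.isspace c
    · by_cases h : cur.isEmpty
      · simp [PySem.Chars.split₀.go, hc, h, ih, pvRuns]
      · simp [PySem.Chars.split₀.go, hc, h, ih, pvRuns]
    · by_cases h : cur.isEmpty
      · have hce : cur = [] := by cases cur <;> simp_all
        subst hce
        simp [PySem.Chars.split₀.go, hc, ih, pvRuns]
    -- cur nonempty, c kept
      · simp [PySem.Chars.split₀.go, hc, ih, h]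

-- alpha-runs survive the non-alpha → space substitution
lemma pvRuns_map (n : Nat) : ∀ (cs : List Char), cs.length ≤ n →
    pvRuns (fun c => ! PySem.Chars.isspace c)
        (cs.map (fun c => if PySem.Chars.isalpha c then c else ' ')) =
      pvRuns PySem.Chars.isalpha cs := by
  have hp : ∀ c : Char,
      (! PySem.Chars.isspace (if PySem.Chars.isalpha c then c else ' ')) = PySem.Chars.isalpha c := by
    intro c
    by_cases h : PySem.Chars.isalpha c
    · simp [h, pvAlpha_not_space c h]
    · simp [h]; decide
  have hfun : ((fun c => ! PySem.Chars.isspace c) ∘ (fun c => if PySem.Chars.isalpha c then c else ' '))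
      = PySem.Chars.isalpha := by funext x; exact hp x
  induction n with
  | zero =>
    intro cs hlen
    have : cs = [] := by cases cs <;> simp_all
    subst this; simp [pvRuns]
  | succ m ih =>
    intro cs hlen
    cases cs with
    | nil => simp [pvRuns]
    | cons c rest =>
      by_cases h : PySem.Chars.isalpha c
      · have hid : (rest.takeWhile PySem.Chars.isalpha).map
            (fun c => if PySem.Chars.isalpha c then c else ' ') = rest.takeWhile PySem.Chars.isalpha := by
          have h1 : (rest.takeWhile PySem.Chars.isalpha).map
              (fun c => if PySem.Chars.isalpha c then c else ' ') =
              (rest.takeWhile PySem.Chars.isalpha).map id :=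
            List.map_congr_left (fun x hx => by simp [List.mem_takeWhile_imp hx])
          simpa using h1
        have hdw := ih (rest.dropWhile PySem.Chars.isalpha)
          (le_trans (List.length_dropWhile_le _ rest) (by simpa using hlen))
        simp [pvRuns, h, pvAlpha_not_space c h, List.takeWhile_map, List.dropWhile_map, hfun, hid, hdw]
      · have hr := ih rest (by simpa using hlen)
        simp [pvRuns, h, hr, show PySem.Chars.isspace ' ' = true from rfl]

-- A's run-builder characterised by pvRuns: two invariants proved together
lemma pvAloop_runs (cs : List Char) :
    (∀ (prev : Char) (res : List (List Char)), PySem.Chars.isalpha prev = false →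
        pvAloop prev cs res = res ++ pvRuns PySem.Chars.isalpha cs) ∧
    (∀ (prev : Char) (res : List (List Char)) (r : List Char), PySem.Chars.isalpha prev = true →
        pvAloop prev cs (res ++ [r]) =
          res ++ (r ++ cs.takeWhile PySem.Chars.isalpha) ::
            pvRuns PySem.Chars.isalpha (cs.dropWhile PySem.Chars.isalpha)) := by
  induction cs with
  | nil =>
    constructor
    · intro prev res _; simp [pvAloop, pvRuns]
    · intro prev res r _; simp [pvAloop, pvRuns]
  | cons c rest ih =>
    constructor
    · intro prev res hprev
      by_cases hc : PySem.Chars.isalpha c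
      · simp only [pvAloop, pvStepA, hc, if_pos, hprev, Bool.false_eq_true, if_neg, not_false_iff]
        rw [ih.2 c res [c] hc]
        simp [pvRuns, hc]
      · simp only [pvAloop, pvStepA, hc, Bool.false_eq_true, if_neg, not_false_iff]
        rw [ih.1 c res (by simpa using hc)]
        simp [pvRuns, hc]
    · intro prev res r hprev
      by_cases hc : PySem.Chars.isalpha c
      · simp only [pvAloop, pvStepA, hc, if_pos, hprev,
          List.dropLast_concat, List.getLast?_concat, Option.getD_some]
        rw [ih.2 c res (r ++ [c]) hc]
        simp [hc]
      · simp only [pvAloop, pvStepA, hc, Bool.false_eq_true, if_neg, not_false_iff]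
        rw [ih.1 c (res ++ [r]) (by simpa using hc)]
        simp [pvRuns, hc]

-- the pyRange index loop of port A is pvAloop from index k with prev = t[k-1]
lemma pvFold_eq_Aloop (t : List Char) : ∀ (n k : Nat) (res : List (List Char)),
    1 ≤ k → t.length = k + n →
    (PySem.List.pyRange (k : Int) (t.length : Int) 1).foldl
        (fun res i => pvStepA (PySem.List.pyGetD t (i - 1) ' ') (PySem.List.pyGetD t i ' ') res) res =
      pvAloop (t.getD (k - 1) ' ') (t.drop k) res := by
  intro n
  induction n with
  | zero =>
    intro k res hk hlen
    rw [PySem.List.pyRange_one_eq_nil (by omega)]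
    rw [List.drop_of_length_le (by omega)]
    simp [pvAloop]
  | succ m ih =>
    intro k res hk hlen
    have hklt : k < t.length := by omega
    rw [PySem.List.pyRange_one_cons (by exact_mod_cast hklt)]
    simp only [List.foldl_cons]
    have h1 : ((k : Int) - 1) = ((k - 1 : Nat) : Int) := by omega
    have e1 : PySem.List.pyGetD t ((k : Int) - 1) ' ' = t.getD (k - 1) ' ' := by
      rw [h1, PySem.List.pyGetD_natCast]
    have e2 : PySem.List.pyGetD t (k : Int) ' ' = t.getD k ' ' := PySem.List.pyGetD_natCast t k ' '
    rw [e1, e2]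
    have : ((k : Int) + 1) = ((k + 1 : Nat) : Int) := by omega
    rw [this, ih (k + 1) _ (by omega) (by omega)]
    rw [List.drop_eq_getElem_cons hklt]
    simp [pvAloop, List.getD, List.getElem?_eq_getElem hklt]

-- ===== VERDICT (by name: the statement is the Claim_ definition above) =====
theorem nonAlphaSplit_spec : Claim_equal_nonAlphaSplit := by
  intro text _
  unfold Spec_nonAlphaSplit nonAlphaSplit nonAlphaSplit_alt
  simp only [PySem.Str.split₀]
  have htl : (String.ofList (text.toList.map (fun c => if PySem.Chars.isalpha c then c else ' '))).toList
      = text.toList.map (fun c => if PySem.Chars.isalpha c then c else ' ') := by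
    simp
  rw [htl]
  -- B side: split₀ = runs of not-space = alpha runs of the original
  have hB : PySem.Chars.split₀ (text.toList.map (fun c => if PySem.Chars.isalpha c then c else ' '))
      = pvRuns PySem.Chars.isalpha text.toList := by
    unfold PySem.Chars.split₀
    rw [pvGo_runs]
    simpa using pvRuns_map _ _ le_rfl
  rw [hB]
  -- A side: unwind the index loop, then the run-builder invariant
  set t : List Char := '#' :: text.toList with ht
  have hlen : t.length = 1 + text.toList.length := by simp [ht, Nat.add_comm]
  have hcons : (PySem.List.pyRange 0 (t.length : Int) 1) = 0 :: PySem.List.pyRange 1 (t.length : Int) 1 := by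
    rw [PySem.List.pyRange_one_cons (by simp [ht])]
    norm_num
  rw [hcons]
  simp only [List.foldl_cons]
  have hstep0 : pvStepA (PySem.List.pyGetD t (0 - 1) ' ') (PySem.List.pyGetD t 0 ' ') [] = [] := by
    have : PySem.List.pyGetD t (0 : Int) ' ' = '#' := by simp [ht, PySem.List.pyGetD_zero_cons]
    rw [this]
    simp [pvStepA, show PySem.Chars.isalpha '#' = false from rfl]
  rw [hstep0]
  have := pvFold_eq_Aloop t (text.toList.length) 1 [] (by omega) (by omega)
  rw [show ((1 : Nat) : Int) = (1 : Int) by norm_num] at this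
  rw [this]
  have hgd : t.getD 0 ' ' = '#' := by simp [ht]
  have hdrop : t.drop 1 = text.toList := by simp [ht]
  rw [hgd, hdrop]
  rw [(pvAloop_runs text.toList).1 '#' [] (by decide)]
  simp
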